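-- pv_equiv track=rewrite | github.com/anas2908/MeSum | Model/meme_bart_text_vid_mfccs_best.py | count_clips
-- ===== SOURCE A (Python) =====
-- def count_clips(binary_str):
--     clips = 0
--     in_clip = False
--
--     for bit in binary_str:
--         if bit == '1':
--             if not in_clip:
--                 in_clip = True
--                 clips += 1
--         else:
--             in_clip = False
--
--     return clips
-- ===== SOURCE B (Python) =====
-- def count_clips(binary_str):
--     # Counting identity: every maximal run of k consecutive '1's contributes
--     # k ones and k-1 adjacent ('1','1') pairs, so
--     #   #runs = #ones - #adjacent-one-pairs.
--     ones = sum(1 for b in binary_str if b == '1')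
--     pairs = sum(1 for x, y in zip(binary_str, binary_str[1:]) if x == '1' and y == '1')
--     return ones - pairs
-- ===== Notes on version B (the rewrite author's own statement) =====
-- stated objective: alternative
-- what changed: Replaces the stateful run-detection loop with the arithmetic identity #runs = #('1' chars) - #(adjacent '1','1' pairs), computed by two independent stateless counts.
import Mathlib
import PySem

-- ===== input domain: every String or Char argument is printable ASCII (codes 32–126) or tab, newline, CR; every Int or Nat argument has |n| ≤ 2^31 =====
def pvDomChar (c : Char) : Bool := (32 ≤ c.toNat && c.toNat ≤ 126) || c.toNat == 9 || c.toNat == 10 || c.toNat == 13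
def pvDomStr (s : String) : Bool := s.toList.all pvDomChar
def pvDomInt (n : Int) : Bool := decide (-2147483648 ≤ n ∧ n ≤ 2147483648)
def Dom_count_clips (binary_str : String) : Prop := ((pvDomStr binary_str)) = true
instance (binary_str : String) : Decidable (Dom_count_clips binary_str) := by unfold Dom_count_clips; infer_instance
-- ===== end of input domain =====

-- B replaces A's run-detection flag loop with the counting identity #runs = #ones - #adjacent '1','1' pairs; objective: alternative.


-- ===== PORT A =====
-- one loop step of A: state = (clips, in_clip)
def countClipsStep (s : Int × Bool) (bit : Char) : Int × Bool :=
  if bit = '1' then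
    if ¬ s.2 then (s.1 + 1, true) else (s.1, true)
  else
    (s.1, false)

def count_clips (binary_str : String) : Int :=
  (binary_str.toList.foldl countClipsStep (0, false)).1

-- ===== PORT B =====
-- sum(1 for b in binary_str if b == '1')
def onesB : List Char → Int
  | [] => 0
  | c :: t => (if c = '1' then 1 else 0) + onesB t

-- sum(1 for x, y in zip(binary_str, binary_str[1:]) if x == '1' and y == '1')
def pairsB : List (Char × Char) → Int
  | [] => 0
  | (x, y) :: t => (if x = '1' ∧ y = '1' then 1 else 0) + pairsB t

def count_clips_alt (binary_str : String) : Int :=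
  let l := binary_str.toList
  onesB l - pairsB (l.zip (PySem.List.slice l (some 1) none))  -- binary_str[1:]

-- ===== PRECONDITION & SPEC =====
def Spec_count_clips (binary_str : String) (out : Int) : Prop := out = count_clips_alt binary_str
instance (binary_str : String) (out : Int) : Decidable (Spec_count_clips binary_str out) := by unfold Spec_count_clips; infer_instance

-- ===== CLAIM (what is proved, stated in full; the proofs are below) =====
def Claim_equal_count_clips : Prop := ∀ (binary_str : String), Dom_count_clips binary_str → Spec_count_clips binary_str (count_clips binary_str)

-- ===== LEMMAS AND PROOFS =====

-- adjacent-'1'-pair count directly on the char list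
def pairsI : List Char → Int
  | [] => 0
  | c :: t => (if c = '1' ∧ t.head? = some '1' then 1 else 0) + pairsI t

theorem pairsB_zip_tail (l : List Char) : pairsB (l.zip l.tail) = pairsI l := by
  induction l with
  | nil => rfl
  | cons a t ih =>
    cases t with
    | nil => simp [pairsB, pairsI]
    | cons b u =>
      simp only [List.tail, List.zip_cons_cons, pairsB, pairsI, List.head?] at *
      rw [← ih]
      simp

-- number of '1'-runs of l, given the flag (true = previous char was '1')
def runs : List Char → Bool → Int
  | [], _ => 0
  | c :: t, flag => (if c = '1' ∧ ¬ flag = true then 1 else 0) + runs t (c = '1')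

theorem foldA_runs (l : List Char) (clips : Int) (flag : Bool) :
    (l.foldl countClipsStep (clips, flag)).1 = clips + runs l flag := by
  induction l generalizing clips flag with
  | nil => simp [runs]
  | cons c t ih =>
    simp only [List.foldl, runs, countClipsStep]
    by_cases h : c = '1' <;> cases flag <;> (simp [h, ih]; try ring)

theorem runs_eq (l : List Char) (flag : Bool) :
    runs l flag = onesB l - pairsI l -
      (if flag = true ∧ l.head? = some '1' then 1 else 0) := by
  induction l generalizing flag with
  | nil => simp [runs, onesB, pairsI]
  | cons c t ih =>
    simp only [runs, onesB, pairsI, List.head?, ih]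
    by_cases h : c = '1' <;> by_cases ht : t.head? = some '1' <;> cases flag <;>
      simp [h, ht] <;> try ring

-- ===== VERDICT (by name: the statement is the Claim_ definition above) =====
theorem count_clips_spec : Claim_equal_count_clips := by
  intro s _
  show count_clips s = count_clips_alt s
  simp only [count_clips, count_clips_alt, PySem.List.slice_from_one, foldA_runs, runs_eq,
    pairsB_zip_tail]
  simp
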